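-- pv_equiv track=rewrite | github.com/MarioRefoyo/Multi-SpaCE | methods/DiscoX/discox_uea.py | ind_list_to_intervals
-- ===== SOURCE A (Python) =====
-- def ind_list_to_intervals(lst):
--     #split non-mapped indices into separate intervals
--     intervals = []
--     intervals_inds = []
--     curr_interval = []
--     curr_interval_inds = []
--
--     prev_i = lst[0]
--     curr_interval.append(prev_i)
--     curr_interval_inds.append(0)
--
--     for ind, i in enumerate(lst[1:]):
--         if i == prev_i + 1:
--             curr_interval.append(i)
--             curr_interval_inds.append(ind+1)
--         else:
--             intervals.append(curr_interval)
--             intervals_inds.append(curr_interval_inds)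
--             curr_interval = [i]
--             curr_interval_inds = [ind+1]
--         prev_i = i
--
--     intervals.append(curr_interval)
--     intervals_inds.append(curr_interval_inds)
--
--     return intervals, intervals_inds
-- ===== SOURCE B (Python) =====
-- def ind_list_to_intervals(lst):
--     # Build the runs back-to-front: scanning positions from the end, each value
--     # either extends the run currently at the front of the result or opens a new run.
--     intervals = []
--     intervals_inds = []
--     for pos, v in reversed(list(enumerate(lst))):
--         if intervals and intervals[0][0] == v + 1:
--             intervals[0] = [v] + intervals[0]
--             intervals_inds[0] = [pos] + intervals_inds[0]
--         else:
--             intervals = [[v]] + intervals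
--             intervals_inds = [[pos]] + intervals_inds
--     return intervals, intervals_inds
-- ===== Notes on version B (the rewrite author's own statement) =====
-- stated objective: alternative
-- what changed: Replaces A's forward state machine (current-run accumulators plus an end-of-loop flush) by a single backward pass that either extends the front run of the result or opens a new one, so no partial-run state or final flush exists. (A raises IndexError on the empty list, excluded by Pre_.)
import Mathlib
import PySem

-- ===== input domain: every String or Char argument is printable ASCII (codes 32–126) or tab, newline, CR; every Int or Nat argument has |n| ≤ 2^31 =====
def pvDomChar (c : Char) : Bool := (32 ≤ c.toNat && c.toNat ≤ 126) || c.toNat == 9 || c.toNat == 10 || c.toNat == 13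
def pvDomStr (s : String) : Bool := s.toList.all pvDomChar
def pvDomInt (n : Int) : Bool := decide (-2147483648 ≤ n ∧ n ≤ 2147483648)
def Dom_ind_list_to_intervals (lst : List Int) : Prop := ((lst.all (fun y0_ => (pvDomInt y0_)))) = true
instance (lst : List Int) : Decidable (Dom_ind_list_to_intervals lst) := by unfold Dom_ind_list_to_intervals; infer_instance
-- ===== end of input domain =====

-- B builds the runs in one backward pass (extend-or-open at the front), removing A's
-- current-run accumulators and final flush; same O(n) cost, different structure.


-- ===== PORT A =====
-- one loop step of A: state = (intervals, intervals_inds, curr_interval, curr_interval_inds, prev_i)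
def astep (s : List (List Int) × List (List Int) × List Int × List Int × Int)
    (p : Int × Int) : List (List Int) × List (List Int) × List Int × List Int × Int :=
  let (intervals, intervals_inds, cur, curinds, prev) := s
  let (ind, i) := p
  if i = prev + 1 then
    (intervals, intervals_inds, cur ++ [i], curinds ++ [ind + 1], i)
  else
    (intervals ++ [cur], intervals_inds ++ [curinds], [i], [ind + 1], i)

def ind_list_to_intervals (lst : List Int) : List (List Int) × List (List Int) :=
  match lst with
  | [] => ([], [])  -- Python raises IndexError at lst[0]; excluded by Pre_
  | h :: _ =>
    let st := (PySem.List.enumerate (PySem.List.slice lst (some 1) none)).foldl astep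
      ([], [], [h], [0], h)
    (st.1 ++ [st.2.2.1], st.2.1 ++ [st.2.2.2.1])

-- ===== PORT B =====
-- one backward step of B: extend the run at the front of the result, or open a new run
def bstep (acc : List (List Int) × List (List Int)) (p : Int × Int) :
    List (List Int) × List (List Int) :=
  let (pos, v) := p
  match acc with
  | ((w :: r) :: ivs', f :: inds') =>
      if w = v + 1 then ((v :: w :: r) :: ivs', (pos :: f) :: inds')
      else ([v] :: (w :: r) :: ivs', [pos] :: f :: inds')
  | (ivs, inds) => ([v] :: ivs, [pos] :: inds)

def ind_list_to_intervals_alt (lst : List Int) : List (List Int) × List (List Int) :=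
  ((PySem.List.enumerate lst).reverse).foldl bstep ([], [])

-- ===== PRECONDITION & SPEC =====
-- Pre_ excludes only the empty list, on which A raises IndexError.
def Pre_ind_list_to_intervals (lst : List Int) : Prop := lst ≠ []
instance (lst : List Int) : Decidable (Pre_ind_list_to_intervals lst) := by
  unfold Pre_ind_list_to_intervals; infer_instance
def pvWitness_ind_list_to_intervals : List Int := [1, 2, 5]

def Spec_ind_list_to_intervals (lst : List Int) (out : List (List Int) × List (List Int)) : Prop :=
  out = ind_list_to_intervals_alt lst
instance (lst : List Int) (out : List (List Int) × List (List Int)) :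
    Decidable (Spec_ind_list_to_intervals lst out) := by
  unfold Spec_ind_list_to_intervals; infer_instance

-- ===== CLAIM (what is proved, stated in full; the proofs are below) =====
def Claim_equal_ind_list_to_intervals : Prop :=
  ∀ (lst : List Int), Dom_ind_list_to_intervals lst → Pre_ind_list_to_intervals lst →
    Spec_ind_list_to_intervals lst (ind_list_to_intervals lst)

-- ===== LEMMAS AND PROOFS =====

-- B's backward fold as a structural recursion: chop s l = runs of l with positions s, s+1, …
def chop (s : Int) (l : List Int) : List (List Int) × List (List Int) :=
  (PySem.List.enumerate l s).foldr (fun p acc => bstep acc p) ([], [])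

lemma chop_nil (s : Int) : chop s [] = ([], []) := by
  simp [chop, PySem.List.enumerate_nil]

lemma chop_cons (s : Int) (v : Int) (t : List Int) :
    chop s (v :: t) = bstep (chop (s + 1) t) (s, v) := by
  simp [chop, PySem.List.enumerate_cons]

lemma alt_eq_chop (lst : List Int) : ind_list_to_intervals_alt lst = chop 0 lst := by
  simp [ind_list_to_intervals_alt, chop, List.foldl_reverse]

-- glue c ci prev P: A's pending run (c, ci) flushed in front of the runs P,
-- merging with P's first run when it continues prev.
def glue (c ci : List Int) (prev : Int) (p : List (List Int) × List (List Int)) :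
    List (List Int) × List (List Int) :=
  match p with
  | ((w :: r) :: I', f :: J') =>
      if w = prev + 1 then ((c ++ w :: r) :: I', (ci ++ f) :: J')
      else (c :: (w :: r) :: I', ci :: f :: J')
  | (I, J) => (c :: I, ci :: J)

lemma glue_bstep_ext (c ci : List Int) (prev pos v : Int)
    (P : List (List Int) × List (List Int)) (h : v = prev + 1) :
    glue c ci prev (bstep P (pos, v)) = glue (c ++ [v]) (ci ++ [pos]) v P := by
  subst h
  obtain ⟨I, J⟩ := P
  match I, J with
  | (w :: r) :: I', f :: J' =>
      by_cases hw : w = prev + 1 + 1 <;> simp [bstep, glue, hw]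
  | [], J => cases J <;> simp [bstep, glue]
  | [] :: I', J => cases J <;> simp [bstep, glue]
  | (w :: r) :: I', [] => by_cases hw : w = prev + 1 + 1 <;> simp [bstep, glue, hw]

lemma glue_bstep_new (c ci : List Int) (prev pos v : Int)
    (P : List (List Int) × List (List Int)) (h : ¬ v = prev + 1) :
    glue c ci prev (bstep P (pos, v)) =
      (c :: (glue [v] [pos] v P).1, ci :: (glue [v] [pos] v P).2) := by
  obtain ⟨I, J⟩ := P
  match I, J with
  | (w :: r) :: I', f :: J' =>
      by_cases hw : w = v + 1 <;> simp [bstep, glue, hw, h]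
  | [], J => cases J <;> simp [bstep, glue, h]
  | [] :: I', J => cases J <;> simp [bstep, glue, h]
  | (w :: r) :: I', [] => by_cases hw : w = v + 1 <;> simp [bstep, glue, hw, h]

lemma glue_single (pos v : Int) (P : List (List Int) × List (List Int)) :
    glue [v] [pos] v P = bstep P (pos, v) := by
  obtain ⟨I, J⟩ := P
  match I, J with
  | (w :: r) :: I', f :: J' => by_cases hw : w = v + 1 <;> simp [bstep, glue, hw]
  | [], J => cases J <;> simp [bstep, glue]
  | [] :: I', J => cases J <;> simp [bstep, glue]
  | (w :: r) :: I', [] => by_cases hw : w = v + 1 <;> simp [bstep, glue, hw]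

-- the main invariant of A's loop
def afinish (st : List (List Int) × List (List Int) × List Int × List Int × Int) :
    List (List Int) × List (List Int) :=
  (st.1 ++ [st.2.2.1], st.2.1 ++ [st.2.2.2.1])

lemma afold_glue (t : List Int) :
    ∀ (s : Int) (I J : List (List Int)) (c ci : List Int) (prev : Int),
    afinish ((PySem.List.enumerate t s).foldl astep (I, J, c, ci, prev))
      = (I ++ (glue c ci prev (chop (s + 1) t)).1,
         J ++ (glue c ci prev (chop (s + 1) t)).2) := by
  induction t with
  | nil => intro s I J c ci prev; simp [PySem.List.enumerate_nil, chop_nil, glue, afinish]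
  | cons v t ih =>
      intro s I J c ci prev
      rw [PySem.List.enumerate_cons, chop_cons]
      by_cases h : v = prev + 1
      · rw [glue_bstep_ext c ci prev (s + 1) v _ h]
        simp only [List.foldl_cons, astep]
        rw [if_pos h]
        exact ih (s + 1) I J (c ++ [v]) (ci ++ [s + 1]) v
      · rw [glue_bstep_new c ci prev (s + 1) v _ h]
        simp only [List.foldl_cons, astep]
        rw [if_neg h]
        rw [ih (s + 1) (I ++ [c]) (J ++ [ci]) [v] [s + 1] v, glue_single]
        simp

-- ===== VERDICT (by name: the statement is the Claim_ definition above) =====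
theorem ind_list_to_intervals_spec : Claim_equal_ind_list_to_intervals := by
  intro lst _ hpre
  unfold Spec_ind_list_to_intervals
  match lst with
  | [] => exact absurd rfl hpre
  | h :: t =>
      rw [alt_eq_chop, chop_cons]
      show afinish ((PySem.List.enumerate (PySem.List.slice (h :: t) (some 1) none)).foldl astep
        ([], [], [h], [0], h)) = _
      rw [PySem.List.slice_from_one, List.tail_cons]
      rw [afold_glue t 0 [] [] [h] [0] h]
      simp [glue_single]
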